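-- pv_equiv track=rewrite | github.com/mcombeau/advent-of-code | 2023/14-parabolic-reflector-dish/main.py | calculate_result_part_2
-- ===== SOURCE A (Python) =====
-- Grid = list[str]
--
-- def roll_rocks_left(grid: Grid) -> Grid:
--     tilted_grid: Grid = []
--     for row in grid:
--         rolled_rocks: list[str] = []
--
--         for group in row.split("#"):
--             rolled: str = "".join(sorted(list(group), reverse=True))
--             rolled_rocks.append(rolled)
--
--         rolled_row = "#".join(rolled_rocks)
--         tilted_grid.append(rolled_row)
--
--     return tilted_grid
--
-- def calculate_load(grid: Grid) -> int:
--     result: int = 0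
--
--     for i, row in enumerate(grid):
--         rock_count = row.count("O")
--         result += rock_count * (len(grid) - i)
--
--     return result
--
-- def cycle(grid: tuple[str, ...]) -> tuple[str, ...]:
--     for _ in range(4):
--         rotated_grid: Grid = list(map("".join, zip(*grid)))
--         tilted_grid: Grid = roll_rocks_left(rotated_grid)
--         grid = tuple(row[::-1] for row in tilted_grid)
--     return grid
--
-- def calculate_result_part_2(lines: list[str]) -> int:
--     grid: tuple[str, ...] = tuple(line.strip() for line in lines)
--     seen_grid_hashes: set = {grid}
--     seen_grids: list[tuple[str, ...]] = [grid]
--     i: int = 0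
--
--     while True:
--         i += 1
--         grid = cycle(grid)
--         if grid in seen_grid_hashes:
--             break
--         seen_grids.append(grid)
--         seen_grid_hashes.add(grid)
--
--     offset = seen_grids.index(grid)
--
--     grid: tuple[str, ...] = seen_grids[(1000000000 - offset) % (i - offset) + offset]
--
--     return calculate_load(list(grid))
-- ===== SOURCE B (Python) =====
-- Grid = list[str]
--
-- def sort_group_desc(group: str) -> str:
--     # run-length sort: count each distinct character, emit largest first
--     counts = {}
--     for ch in group:
--         counts[ch] = counts.get(ch, 0) + 1
--     return "".join(ch * counts[ch] for ch in sorted(counts, reverse=True))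
--
-- def tilt_row(row: str) -> str:
--     return "#".join(sort_group_desc(g) for g in row.split("#"))
--
-- def quarter(grid: tuple[str, ...]) -> tuple[str, ...]:
--     # rotate by index-based transposition (truncating at the shortest row),
--     # tilt every row, then flip it
--     width = min((len(r) for r in grid), default=0)
--     cols = ["".join(r[i] for r in grid) for i in range(width)]
--     return tuple(tilt_row(c)[::-1] for c in cols)
--
-- def spin(grid: tuple[str, ...]) -> tuple[str, ...]:
--     return quarter(quarter(quarter(quarter(grid))))
--
-- def north_load(grid: tuple[str, ...]) -> int:
--     total = 0
--     for height, row in enumerate(reversed(grid), start=1):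
--         total += row.count("O") * height
--     return total
--
-- def calculate_result_part_2(lines: list[str]) -> int:
--     # Floyd's tortoise-and-hare cycle detection on the spin transition:
--     # constant extra memory instead of memoizing every seen grid.
--     start = tuple(line.strip() for line in lines)
--     tortoise, hare = spin(start), spin(spin(start))
--     while tortoise != hare:
--         tortoise, hare = spin(tortoise), spin(spin(hare))
--     mu, tortoise = 0, start
--     while tortoise != hare:
--         tortoise, hare, mu = spin(tortoise), spin(hare), mu + 1
--     lam, hare = 1, spin(tortoise)
--     while tortoise != hare:
--         hare, lam = spin(hare), lam + 1
--     grid = start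
--     for _ in range((1000000000 - mu) % lam + mu):
--         grid = spin(grid)
--     return north_load(grid)
-- ===== Notes on version B (the rewrite author's own statement) =====
-- stated objective: alternative
-- what changed: The set+list memoization of every seen grid is replaced by Floyd's tortoise-and-hare cycle detection (three constant-memory pointer phases yielding mu and lam, then re-simulating (1000000000 - mu) % lam + mu spins forward), and the helpers are rebuilt differently too: the per-segment descending sort becomes a run-length count of each distinct character expanded largest-first, the rotation becomes an index-based transposition instead of recursive zipping, and the load is summed over the reversed grid.
import Mathlib
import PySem

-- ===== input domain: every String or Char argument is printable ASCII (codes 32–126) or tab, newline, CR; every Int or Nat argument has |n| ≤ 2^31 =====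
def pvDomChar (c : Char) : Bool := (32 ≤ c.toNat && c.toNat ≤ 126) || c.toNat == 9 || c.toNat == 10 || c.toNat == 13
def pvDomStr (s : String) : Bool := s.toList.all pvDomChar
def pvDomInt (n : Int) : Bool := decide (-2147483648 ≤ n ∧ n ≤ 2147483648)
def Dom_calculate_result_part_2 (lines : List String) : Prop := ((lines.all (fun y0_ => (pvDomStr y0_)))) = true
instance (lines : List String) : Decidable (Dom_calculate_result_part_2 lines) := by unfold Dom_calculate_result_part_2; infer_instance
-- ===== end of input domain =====

-- B replaces A's set+list memoization of every seen grid by Floyd's tortoise-and-hare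
-- cycle detection on the spin transition, with the grid rotation done by index-based
-- transposition, the per-segment sort done by a run-length count of each distinct
-- character, and the load summed over the reversed grid; same return value.


-- ===== PORT A =====

-- "".join(sorted(list(group), reverse=True))
def pvSortedDesc (cs : List Char) : List Char := PySem.List.sorted cs (fun c => c) true

-- one row of roll_rocks_left: split on "#", sort each group descending, rejoin with "#"
def pvRollRow (row : List Char) : List Char :=
  PySem.Chars.join ['#'] ((PySem.Chars.splitOn row ['#']).map pvSortedDesc)

-- roll_rocks_left: for-append loop over the rows
def pvRoll (g : List (List Char)) : List (List Char) :=
  g.foldl (fun acc row => acc ++ [pvRollRow row]) []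

-- helper lemma used only for the termination of pvZipStar (cited in decreasing_by)
theorem pvTailSum_lt (r : List Char) (g : List (List Char)) (hr : r ≠ []) :
    (((r :: g).map (fun row => row.tail)).map List.length).sum <
      ((r :: g).map List.length).sum := by
  simp only [List.map_cons, List.map_map, List.sum_cons, Function.comp_def]
  have h1 : r.tail.length < r.length := by
    cases r with
    | nil => exact absurd rfl hr
    | cons a t => simp
  have h2 : (g.map fun x => x.tail.length).sum ≤ (g.map fun x => x.length).sum :=
    List.sum_le_sum (fun x _ => by simp only [List.length_tail]; omega)
  have h2' : (g.map fun x => x.tail.length).sum ≤ (g.map List.length).sum := by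
    simpa using h2
  omega

-- zip(*grid): truncating transpose (stops at the shortest row), then "".join per column
def pvZipStar : List (List Char) → List (List Char)
  | [] => []
  | r :: g =>
    if h : (r :: g).any (fun row => row.isEmpty) then []
    else ((r :: g).map (fun row => row.headI)) :: pvZipStar ((r :: g).map (fun row => row.tail))
termination_by l => ((l.map List.length).sum)
decreasing_by
  have hr : r ≠ [] := by
    intro hrr
    subst hrr
    simp at h
  exact pvTailSum_lt r g hr

-- one iteration of cycle's inner for-loop; row[::-1] is List.reverse (PySem.List.slice?_none_none_neg_one)
def pvQuarter (g : List (List Char)) : List (List Char) :=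
  (pvRoll (pvZipStar g)).map List.reverse

-- cycle: for _ in range(4)
def pvCycle (g : List (List Char)) : List (List Char) :=
  (List.range 4).foldl (fun h _ => pvQuarter h) g

-- calculate_load
def pvLoad (g : List (List Char)) : Int :=
  (PySem.List.enumerate g 0).foldl
    (fun result p => result + (PySem.Chars.count p.2 ['O'] : Int) * ((g.length : Int) - p.1)) 0

-- fuel bound for the while-loops (totality guard only; proved never to run out):
-- every grid the loops can ever see has ≤ pvC rows and rows of length ≤ pvC, so there are
-- fewer than pvF distinct such grids.
def pvC (g : List (List Char)) : Nat := (g.map List.length).sum + g.length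
def pvF (g : List (List Char)) : Nat := (1114113 ^ (pvC g + 1) + 1) ^ (pvC g + 1) + 2

-- A's `while True` memoization loop: returns (grid, seen_grids, i) at the break
def pvLoopA : Nat → List (List Char) → PySem.Set (List (List Char)) →
    List (List (List Char)) → Int → (List (List Char)) × List (List (List Char)) × Int
  | 0, g, _, seen, i => (g, seen, i)
  | fuel + 1, g, sset, seen, i =>
    let i' := i + 1
    let g' := pvCycle g
    if sset.contains g' then (g', seen, i')
    else pvLoopA fuel g' (sset.add g') (seen ++ [g']) i'

def calculate_result_part_2 (lines : List String) : Int :=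
  let grid := lines.map (fun l => PySem.Chars.strip l.toList)
  let r := pvLoopA (pvF grid) grid (PySem.Set.ofList [grid]) [grid] 0
  -- offset = seen_grids.index(grid): the loop broke on membership, so index? is some
  let offset : Int := ((PySem.List.index? r.2.1 r.1).getD 0 : Nat)
  let idx : Int := PySem.Int.mod (1000000000 - offset) (r.2.2 - offset) + offset
  -- seen_grids[idx]: in range, so pyGet? is some
  pvLoad ((PySem.List.pyGet? r.2.1 idx).getD [])

-- ===== PORT B =====

-- sort_group_desc: run-length sort; counts[ch] = counts.get(ch, 0) + 1, then
-- "".join(ch*counts[ch] for ch in sorted(counts, reverse=True))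
def pvBSort (cs : List Char) : List Char :=
  let counts := cs.foldl (fun d c => d.insert c (d.getD c 0 + 1))
    (PySem.Dict.empty (κ := Char) (ν := Nat))
  (PySem.List.sorted counts.keys (fun c => c) true).flatMap
    (fun c => List.replicate (counts.getD c 0) c)

-- tilt_row: "#".join(sort_group_desc(g) for g in row.split("#"))
def pvBTiltRow (row : List Char) : List Char :=
  PySem.Chars.join ['#'] ((PySem.Chars.splitOn row ['#']).map pvBSort)

-- width = min((len(r) for r in grid), default=0)
def pvBWidth (g : List (List Char)) : Nat := ((g.map List.length).min?).getD 0

-- quarter: index-based transposition (r[i] is in range for i < width), tilt, flip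
def pvBQuarter (g : List (List Char)) : List (List Char) :=
  let cols := (List.range (pvBWidth g)).map (fun i => g.map (fun r => r.getD i ' '))
  cols.map (fun c => (pvBTiltRow c).reverse)

-- spin: quarter applied four times
def pvBSpin (g : List (List Char)) : List (List Char) :=
  pvBQuarter (pvBQuarter (pvBQuarter (pvBQuarter g)))

-- north_load: enumerate(reversed(grid), start=1)
def pvBLoad (g : List (List Char)) : Int :=
  (PySem.List.enumerate g.reverse 1).foldl
    (fun total p => total + (PySem.Chars.count p.2 ['O'] : Int) * p.1) 0

-- Floyd phase 1: tortoise one spin, hare two, until they meet; returns hare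
def pvBPhase1 : Nat → List (List Char) → List (List Char) → List (List Char)
  | 0, _, h => h
  | fuel + 1, t, h => if t = h then h else pvBPhase1 fuel (pvBSpin t) (pvBSpin (pvBSpin h))

-- Floyd phase 2: tortoise restarts at the initial grid; lockstep until equal; counts mu
def pvBPhase2 : Nat → List (List Char) → List (List Char) → Nat → (List (List Char)) × Nat
  | 0, t, _, m => (t, m)
  | fuel + 1, t, h, m => if t = h then (t, m) else pvBPhase2 fuel (pvBSpin t) (pvBSpin h) (m + 1)

-- Floyd phase 3: hare walks around the cycle until it returns to tortoise; counts lam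
def pvBPhase3 : Nat → List (List Char) → List (List Char) → Nat → Nat
  | 0, _, _, j => j
  | fuel + 1, t, h, j => if t = h then j else pvBPhase3 fuel t (pvBSpin h) (j + 1)

def calculate_result_part_2_alt (lines : List String) : Int :=
  let start := lines.map (fun l => PySem.Chars.strip l.toList)
  let fuel := pvF start
  let meet := pvBPhase1 fuel (pvBSpin start) (pvBSpin (pvBSpin start))
  let p2 := pvBPhase2 fuel start meet 0
  let lam := pvBPhase3 fuel p2.1 (pvBSpin p2.1) 1
  let idx : Int := PySem.Int.mod (1000000000 - (p2.2 : Int)) (lam : Int) + (p2.2 : Int)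
  pvBLoad ((List.range idx.toNat).foldl (fun h _ => pvBSpin h) start)

-- ===== PRECONDITION & SPEC =====
def Spec_calculate_result_part_2 (lines : List String) (out : Int) : Prop := out = calculate_result_part_2_alt lines
instance (lines : List String) (out : Int) : Decidable (Spec_calculate_result_part_2 lines out) := by unfold Spec_calculate_result_part_2; infer_instance

-- ===== CLAIM (what is proved, stated in full; the proofs are below) =====
def Claim_equal_calculate_result_part_2 : Prop := ∀ (lines : List String), Dom_calculate_result_part_2 lines → Spec_calculate_result_part_2 lines (calculate_result_part_2 lines)

-- ===== LEMMAS AND PROOFS =====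

-- § 1: the split-on-'#' helper preserves row length and row characters

def pvSplitAux : List Char → List Char → List (List Char)
  | [], cur => [cur.reverse]
  | c :: rest, cur =>
    if c = '#' then cur.reverse :: pvSplitAux rest [] else pvSplitAux rest (c :: cur)

theorem pvGo_eq : ∀ (fuel : Nat) (l cur : List Char) (acc : List (List Char)),
    l.length ≤ fuel →
    PySem.Chars.splitOn.go ['#'] fuel l cur acc = acc.reverse ++ pvSplitAux l cur := by
  intro fuel
  induction fuel with
  | zero =>
    intro l cur acc hl
    have : l = [] := List.eq_nil_of_length_eq_zero (Nat.le_zero.mp hl)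
    subst this
    simp [PySem.Chars.splitOn.go, pvSplitAux]
  | succ n ih =>
    intro l cur acc hl
    cases l with
    | nil => simp [PySem.Chars.splitOn.go, pvSplitAux]
    | cons c rest =>
      rw [PySem.Chars.splitOn.go]
      by_cases hc : c = '#'
      · subst hc
        have hp : List.isPrefixOf ['#'] ('#' :: rest) = true := by simp [List.isPrefixOf]
        simp only [hp, if_true]
        rw [ih _ _ _ (by simpa using Nat.le_of_succ_le_succ hl)]
        simp [pvSplitAux]
      · have hp : List.isPrefixOf ['#'] (c :: rest) = false := by
          simp [List.isPrefixOf]; exact fun h => absurd h.symm hc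
        simp only [hp]
        rw [if_neg (by simp)]
        rw [ih _ _ _ (by simpa using Nat.le_of_succ_le_succ hl)]
        simp [pvSplitAux, hc]

theorem pvSplitOn_eq (row : List Char) :
    PySem.Chars.splitOn row ['#'] = pvSplitAux row [] := by
  unfold PySem.Chars.splitOn
  rw [pvGo_eq _ _ _ _ (by omega)]
  simp

theorem pvSplitAux_ne_nil : ∀ (l cur : List Char), pvSplitAux l cur ≠ [] := by
  intro l
  induction l with
  | nil => intro cur; simp [pvSplitAux]
  | cons c rest ih =>
    intro cur
    by_cases hc : c = '#' <;> simp [pvSplitAux, hc] <;> exact ih _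

-- length of "#".join(parts) for nonempty parts
theorem pvJoinLen : ∀ (parts : List (List Char)), parts ≠ [] →
    (PySem.Chars.join ['#'] parts).length + 1 = (parts.map List.length).sum + parts.length := by
  intro parts
  induction parts with
  | nil => intro h; exact absurd rfl h
  | cons a rest ih =>
    intro _
    cases rest with
    | nil => simp [PySem.Chars.join, List.intercalate]
    | cons b t =>
      have hj : PySem.Chars.join ['#'] (a :: b :: t) = a ++ ['#'] ++ PySem.Chars.join ['#'] (b :: t) := by
        simp [PySem.Chars.join, List.intercalate, List.intersperse_cons₂]
      have ih' := ih (by simp)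
      rw [hj]
      simp only [List.length_append, List.map_cons, List.sum_cons, List.length_cons, List.length_nil] at ih' ⊢
      omega

theorem pvSplitSum : ∀ (l cur : List Char),
    ((pvSplitAux l cur).map List.length).sum + (pvSplitAux l cur).length = cur.length + l.length + 1 := by
  intro l
  induction l with
  | nil => intro cur; simp [pvSplitAux]
  | cons c rest ih =>
    intro cur
    by_cases hc : c = '#'
    · subst hc
      rw [show pvSplitAux ('#' :: rest) cur = cur.reverse :: pvSplitAux rest [] from by
        simp [pvSplitAux]]
      have h1 := ih ([] : List Char)
      simp only [List.map_cons, List.sum_cons, List.length_cons, List.length_reverse,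
        List.length_nil] at *
      omega
    · rw [show pvSplitAux (c :: rest) cur = pvSplitAux rest (c :: cur) from by
        simp [pvSplitAux, hc]]
      have h1 := ih (c :: cur)
      simp only [List.length_cons] at *
      omega

theorem pvRollRowLen (row : List Char) :
    (PySem.Chars.join ['#'] ((pvSplitAux row []).map (fun g => PySem.List.sorted g (fun c => c) true))).length = row.length := by
  have hne : (pvSplitAux row []).map (fun g => PySem.List.sorted g (fun c => c) true) ≠ [] := by
    simp [pvSplitAux_ne_nil]
  have hj := pvJoinLen _ hne
  have hm : ((pvSplitAux row []).map (fun g => PySem.List.sorted g (fun c => c) true)).map List.length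
      = (pvSplitAux row []).map List.length := by
    simp [List.map_map, Function.comp_def, PySem.List.length_sorted]
  rw [hm, List.length_map] at hj
  have hs := pvSplitSum row []
  simp only [List.length_nil] at hs
  omega

-- § 2: shape facts: total character count never grows through a quarter turn

def pvTC (g : List (List Char)) : Nat := (g.map List.length).sum

theorem pvRoll_eq_map (g : List (List Char)) : pvRoll g = g.map pvRollRow := by
  unfold pvRoll
  simpa using PySem.List.foldl_append_singleton_eq_map pvRollRow g []

theorem pvRollRow_len (row : List Char) : (pvRollRow row).length = row.length := by
  unfold pvRollRow pvSortedDesc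
  rw [pvSplitOn_eq]
  exact pvRollRowLen row

theorem pvRoll_map_len (g : List (List Char)) :
    (pvRoll g).map List.length = g.map List.length := by
  rw [pvRoll_eq_map, List.map_map]
  exact List.map_congr_left (fun r _ => pvRollRow_len r)

theorem pvRev_map_len (g : List (List Char)) :
    (g.map List.reverse).map List.length = g.map List.length := by
  rw [List.map_map]
  exact List.map_congr_left (fun r _ => List.length_reverse)

-- all rows nonempty: tails lose exactly one char per row
theorem pvTC_tails (g : List (List Char)) (h : ∀ r ∈ g, r ≠ []) :
    pvTC (g.map (fun row => row.tail)) + g.length = pvTC g := by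
  induction g with
  | nil => simp [pvTC]
  | cons r t ih =>
    have hr : r ≠ [] := h r (by simp)
    have ht := ih (fun x hx => h x (by simp [hx]))
    simp only [pvTC, List.map_cons, List.map_map, List.sum_cons, List.length_cons] at *
    have : r.tail.length + 1 = r.length := by
      cases r with
      | nil => exact absurd rfl hr
      | cons a b => simp
    omega

theorem pvLen_le_tc (g : List (List Char)) (h : ∀ r ∈ g, r ≠ []) : g.length ≤ pvTC g := by
  induction g with
  | nil => simp [pvTC]
  | cons r t ih =>
    have hr : r ≠ [] := h r (by simp)
    have ht := ih (fun x hx => h x (by simp [hx]))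
    have : 1 ≤ r.length := List.length_pos_of_ne_nil hr
    simp only [pvTC, List.map_cons, List.sum_cons, List.length_cons] at *
    omega

theorem pvZipStar_rows (g : List (List Char)) : ∀ r ∈ pvZipStar g, r.length = g.length := by
  fun_induction pvZipStar g with
  | case1 => simp
  | case2 r g h => simp
  | case3 r g h ih =>
    intro x hx
    rcases List.mem_cons.mp hx with rfl | hx
    · simp
    · have := ih x hx
      simpa using this

theorem pvZipStar_nonempty_rows (g : List (List Char)) (h : pvZipStar g ≠ []) :
    g ≠ [] ∧ ∀ r ∈ g, r ≠ [] := by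
  cases g with
  | nil => simp [pvZipStar] at h
  | cons r t =>
    refine ⟨by simp, ?_⟩
    by_cases ha : ((r :: t).any fun row => row.isEmpty) = true
    · rw [pvZipStar, dif_pos ha] at h
      exact absurd rfl h
    · intro x hx
      simp only [List.any_eq_true] at ha
      intro hxe
      exact ha ⟨x, hx, by simp [hxe]⟩

theorem pvZipStar_len (g : List (List Char)) : (pvZipStar g).length ≤ pvTC g := by
  fun_induction pvZipStar g with
  | case1 => simp
  | case2 r g h => simp
  | case3 r g h ih =>
    simp only [List.length_cons]
    have hne : ∀ x ∈ r :: g, x ≠ [] := by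
      simp only [List.any_eq_true] at h
      intro x hx hxe
      exact absurd (by simp [hxe] : x.isEmpty = true) (by
        intro hh
        exact h ⟨x, hx, hh⟩)
    have htc := pvTC_tails (r :: g) hne
    have hlen := pvLen_le_tc (r :: g) hne
    simp only [List.length_cons] at hlen htc
    omega

theorem pvZipStar_tc (g : List (List Char)) : pvTC (pvZipStar g) ≤ pvTC g := by
  fun_induction pvZipStar g with
  | case1 => simp [pvTC]
  | case2 r g h => simp [pvTC]
  | case3 r g h ih =>
    have hne : ∀ x ∈ r :: g, x ≠ [] := by
      simp only [List.any_eq_true] at h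
      intro x hx hxe
      exact absurd (by simp [hxe] : x.isEmpty = true) (by
        intro hh
        exact h ⟨x, hx, hh⟩)
    have htc := pvTC_tails (r :: g) hne
    simp only [pvTC, List.map_cons, List.sum_cons, List.length_map, List.length_cons] at *
    omega

-- § 3: every iterate of `cycle` from the start grid is size-bounded

def pvBnd (C : Nat) (g : List (List Char)) : Prop :=
  g.length ≤ C ∧ ∀ r ∈ g, r.length ≤ C

theorem pvQuarter_tc (g : List (List Char)) : pvTC (pvQuarter g) ≤ pvTC g := by
  unfold pvQuarter pvTC
  rw [pvRev_map_len, pvRoll_map_len]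
  exact pvZipStar_tc g

theorem pvQuarter_len (g : List (List Char)) : (pvQuarter g).length ≤ pvTC g := by
  unfold pvQuarter
  rw [List.length_map, pvRoll_eq_map, List.length_map]
  exact pvZipStar_len g

theorem pvQuarter_rows (g : List (List Char)) : ∀ r ∈ pvQuarter g, r.length ≤ pvTC g := by
  intro r hr
  unfold pvQuarter at hr
  rw [pvRoll_eq_map, List.map_map] at hr
  obtain ⟨z, hz, rfl⟩ := List.mem_map.mp hr
  have hzlen : z.length = g.length := pvZipStar_rows g z hz
  have hzs : pvZipStar g ≠ [] := List.ne_nil_of_mem hz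
  obtain ⟨-, hrows⟩ := pvZipStar_nonempty_rows g hzs
  have : g.length ≤ pvTC g := pvLen_le_tc g hrows
  simp only [Function.comp_def, List.length_reverse, pvRollRow_len]
  omega

theorem pvCycle_eq (g : List (List Char)) :
    pvCycle g = pvQuarter (pvQuarter (pvQuarter (pvQuarter g))) := by
  simp [pvCycle, List.range_succ]

theorem pvCycle_tc (g : List (List Char)) : pvTC (pvCycle g) ≤ pvTC g := by
  rw [pvCycle_eq]
  calc pvTC (pvQuarter (pvQuarter (pvQuarter (pvQuarter g))))
      ≤ pvTC (pvQuarter (pvQuarter (pvQuarter g))) := pvQuarter_tc _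
    _ ≤ pvTC (pvQuarter (pvQuarter g)) := pvQuarter_tc _
    _ ≤ pvTC (pvQuarter g) := pvQuarter_tc _
    _ ≤ pvTC g := pvQuarter_tc _

theorem pvCycle_bnd (g : List (List Char)) {C : Nat} (h : pvTC g ≤ C) :
    pvBnd C (pvCycle g) := by
  rw [pvCycle_eq]
  set h3 := pvQuarter (pvQuarter (pvQuarter g)) with hh3
  have htc3 : pvTC h3 ≤ C := by
    rw [hh3]
    have h1 := pvQuarter_tc g
    have h2 := pvQuarter_tc (pvQuarter g)
    have h3' := pvQuarter_tc (pvQuarter (pvQuarter g))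
    omega
  exact ⟨(pvQuarter_len h3).trans htc3, fun r hr => (pvQuarter_rows h3 r hr).trans htc3⟩

theorem pvIter_tc (g : List (List Char)) : ∀ k, pvTC (pvCycle^[k] g) ≤ pvTC g := by
  intro k
  induction k with
  | zero => simp
  | succ n ih =>
    rw [Function.iterate_succ_apply']
    exact (pvCycle_tc _).trans ih

theorem pvMem_len_le_tc (g : List (List Char)) : ∀ r ∈ g, r.length ≤ pvTC g := by
  intro r hr
  exact List.single_le_sum (fun _ _ => Nat.zero_le _) _ (List.mem_map_of_mem hr)

theorem pvIter_bnd (g : List (List Char)) : ∀ k, pvBnd (pvC g) (pvCycle^[k] g) := by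
  intro k
  cases k with
  | zero =>
    refine ⟨by simp [pvC], fun r hr => ?_⟩
    have := pvMem_len_le_tc g r hr
    simp only [Function.iterate_zero, id] at hr ⊢
    unfold pvC pvTC at *
    omega
  | succ n =>
    rw [Function.iterate_succ_apply']
    have h1 : pvTC (pvCycle^[n] g) ≤ pvTC g := pvIter_tc g n
    have h2 : pvTC (pvCycle^[n] g) ≤ pvC g := by unfold pvC pvTC at *; omega
    exact pvCycle_bnd _ h2

-- § 4: a positional encoding shows there are < pvF-2 bounded grids, so the orbit collides

def pvEncN (B : Nat) : List Nat → Nat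
  | [] => 0
  | d :: t => (d + 1) + (B + 1) * pvEncN B t

theorem pvEncN_lt (B : Nat) : ∀ l : List Nat, (∀ d ∈ l, d < B) →
    pvEncN B l < (B + 1) ^ l.length := by
  intro l
  induction l with
  | nil => simp [pvEncN]
  | cons d t ih =>
    intro h
    have hd : d < B := h d (by simp)
    have he : pvEncN B t < (B + 1) ^ t.length := ih (fun x hx => h x (by simp [hx]))
    have h1 : (B + 1) * (pvEncN B t + 1) ≤ (B + 1) * (B + 1) ^ t.length :=
      Nat.mul_le_mul_left _ he
    have h2 : (B + 1) * (pvEncN B t + 1) = (B + 1) * pvEncN B t + (B + 1) := by ring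
    simp only [pvEncN, List.length_cons, pow_succ]
    have h3 : (B + 1) * (B + 1) ^ t.length = (B + 1) ^ t.length * (B + 1) := by ring
    omega

theorem pvEncN_inj (B : Nat) : ∀ l1 l2 : List Nat, (∀ d ∈ l1, d < B) → (∀ d ∈ l2, d < B) →
    pvEncN B l1 = pvEncN B l2 → l1 = l2 := by
  intro l1
  induction l1 with
  | nil =>
    intro l2 _ _ h
    cases l2 with
    | nil => rfl
    | cons d t => simp only [pvEncN] at h; omega
  | cons d t ih =>
    intro l2 h1 h2 h
    cases l2 with
    | nil => simp only [pvEncN] at h; omega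
    | cons d' t' =>
      simp only [pvEncN] at h
      have hd : d < B := h1 d (by simp)
      have hd' : d' < B := h2 d' (by simp)
      have hmod := congrArg (fun x => x % (B + 1)) h
      simp only [Nat.add_mul_mod_self_left] at hmod
      rw [Nat.mod_eq_of_lt (by omega), Nat.mod_eq_of_lt (by omega)] at hmod
      have hdd : d = d' := by omega
      subst hdd
      have ht : pvEncN B t = pvEncN B t' := by
        have := Nat.eq_of_mul_eq_mul_left (show 0 < B + 1 by omega)
          (show (B + 1) * pvEncN B t = (B + 1) * pvEncN B t' by omega)
        exact this
      rw [ih t' (fun x hx => h1 x (by simp [hx])) (fun x hx => h2 x (by simp [hx])) ht]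

theorem pvCharLt (c : Char) : c.toNat < 1114112 := by
  have h := c.valid
  unfold UInt32.isValidChar Nat.isValidChar at h
  unfold Char.toNat
  omega

def pvEncRow (r : List Char) : Nat := pvEncN 1114112 (r.map Char.toNat)

theorem pvEncRow_lt (r : List Char) : pvEncRow r < 1114113 ^ r.length := by
  have := pvEncN_lt 1114112 (r.map Char.toNat) (by
    intro d hd
    obtain ⟨c, _, rfl⟩ := List.mem_map.mp hd
    exact pvCharLt c)
  simpa using this

theorem pvEncRow_inj (r1 r2 : List Char) (h : pvEncRow r1 = pvEncRow r2) : r1 = r2 := by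
  have := pvEncN_inj 1114112 (r1.map Char.toNat) (r2.map Char.toNat)
    (by intro d hd; obtain ⟨c, _, rfl⟩ := List.mem_map.mp hd; exact pvCharLt c)
    (by intro d hd; obtain ⟨c, _, rfl⟩ := List.mem_map.mp hd; exact pvCharLt c) h
  exact List.map_injective_iff.mpr (fun a b hab => Char.ext (UInt32.toNat_inj.mp hab)) this

def pvEncG (C : Nat) (g : List (List Char)) : Nat :=
  pvEncN (1114113 ^ (C + 1)) (g.map pvEncRow)

theorem pvEncG_digits (C : Nat) (g : List (List Char)) (hb : pvBnd C g) :
    ∀ d ∈ g.map pvEncRow, d < 1114113 ^ (C + 1) := by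
  intro d hd
  obtain ⟨r, hr, rfl⟩ := List.mem_map.mp hd
  have h1 : pvEncRow r < 1114113 ^ r.length := pvEncRow_lt r
  have h2 : (1114113:Nat) ^ r.length ≤ 1114113 ^ (C + 1) :=
    Nat.pow_le_pow_right (by omega) (by have := hb.2 r hr; omega)
  omega

theorem pvEncG_lt (C : Nat) (g : List (List Char)) (hb : pvBnd C g) :
    pvEncG C g < (1114113 ^ (C + 1) + 1) ^ (C + 1) := by
  have h1 := pvEncN_lt (1114113 ^ (C + 1)) (g.map pvEncRow) (pvEncG_digits C g hb)
  have h2 : ((1114113:Nat) ^ (C + 1) + 1) ^ (g.map pvEncRow).length ≤ (1114113 ^ (C + 1) + 1) ^ (C + 1) :=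
    Nat.pow_le_pow_right (by positivity) (by simpa using hb.1.trans (by omega))
  exact h1.trans_le h2

theorem pvEncG_inj (C : Nat) (g1 g2 : List (List Char)) (h1 : pvBnd C g1) (h2 : pvBnd C g2)
    (h : pvEncG C g1 = pvEncG C g2) : g1 = g2 := by
  have := pvEncN_inj (1114113 ^ (C + 1)) (g1.map pvEncRow) (g2.map pvEncRow)
    (pvEncG_digits C g1 h1) (pvEncG_digits C g2 h2) h
  exact List.map_injective_iff.mpr (fun a b hab => pvEncRow_inj a b hab) this

theorem pvPigeon (C : Nat) (l : List (List (List Char))) (hnd : l.Nodup)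
    (hb : ∀ x ∈ l, pvBnd C x) : l.length ≤ (1114113 ^ (C + 1) + 1) ^ (C + 1) := by
  set F := (1114113 ^ (C + 1) + 1) ^ (C + 1) with hF
  have hmapnd : (l.map (pvEncG C)).Nodup := by
    apply List.Nodup.map_on
    · intro x hx y hy hxy
      exact pvEncG_inj C x y (hb x hx) (hb y hy) hxy
    · exact hnd
  have hsub : (l.map (pvEncG C)).toFinset ⊆ Finset.range F := by
    intro n hn
    simp only [List.mem_toFinset, List.mem_map] at hn
    obtain ⟨x, hx, rfl⟩ := hn
    simp only [Finset.mem_range, hF]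
    exact pvEncG_lt C x (hb x hx)
  have hcard := Finset.card_le_card hsub
  rw [List.toFinset_card_of_nodup hmapnd, Finset.card_range, List.length_map] at hcard
  exact hcard

-- the orbit of `cycle` must collide
theorem pvColl (g : List (List Char)) :
    ∃ i, 0 < i ∧ ∃ j, j < i ∧ pvCycle^[i] g = pvCycle^[j] g := by
  by_contra hc
  push Not at hc
  set F := (1114113 ^ (pvC g + 1) + 1) ^ (pvC g + 1) with hF
  have hdist : ∀ a b : Nat, a < b → pvCycle^[a] g ≠ pvCycle^[b] g := by
    intro a b hab he
    exact hc b (by omega) a hab he.symm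
  have hnd : ((List.range (F + 1)).map (fun k => pvCycle^[k] g)).Nodup := by
    apply List.Nodup.map_on
    · intro x hx y hy hxy
      by_contra hne
      rcases Nat.lt_or_ge x y with hlt | hge
      · exact hdist x y hlt hxy
      · exact hdist y x (by omega) hxy.symm
    · exact List.nodup_range
  have hb : ∀ x ∈ (List.range (F + 1)).map (fun k => pvCycle^[k] g), pvBnd (pvC g) x := by
    intro x hx
    obtain ⟨k, _, rfl⟩ := List.mem_map.mp hx
    exact pvIter_bnd g k
  have := pvPigeon (pvC g) _ hnd hb
  simp only [List.length_map, List.length_range, hF] at this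
  omega

-- § 5: the first collision index pvI, the cycle start pvMu, the period pvLam

def pvI (g : List (List Char)) : Nat := Nat.find (pvColl g)

theorem pvI_pos (g : List (List Char)) : 0 < pvI g := (Nat.find_spec (pvColl g)).1

theorem pvMuEx (g : List (List Char)) :
    ∃ j, j < pvI g ∧ pvCycle^[pvI g] g = pvCycle^[j] g := (Nat.find_spec (pvColl g)).2

def pvMu (g : List (List Char)) : Nat := Nat.find (pvMuEx g)
def pvLam (g : List (List Char)) : Nat := pvI g - pvMu g

theorem pvMu_lt (g : List (List Char)) : pvMu g < pvI g := (Nat.find_spec (pvMuEx g)).1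

theorem pvLam_pos (g : List (List Char)) : 0 < pvLam g := by
  have := pvMu_lt g
  unfold pvLam
  omega

theorem pvMuLam (g : List (List Char)) : pvMu g + pvLam g = pvI g := by
  have := pvMu_lt g
  unfold pvLam
  omega

theorem pvIt_I (g : List (List Char)) : pvCycle^[pvI g] g = pvCycle^[pvMu g] g :=
  (Nat.find_spec (pvMuEx g)).2

-- K1: the first pvI iterates are pairwise distinct
theorem pvK1 (g : List (List Char)) : ∀ a b, a < b → b < pvI g →
    pvCycle^[a] g ≠ pvCycle^[b] g := by
  intro a b hab hb he
  exact Nat.find_min (pvColl g) hb ⟨by omega, a, hab, he.symm⟩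

-- pvMu is the least j with it I = it j
theorem pvMu_min (g : List (List Char)) : ∀ j, j < pvMu g →
    pvCycle^[pvI g] g ≠ pvCycle^[j] g := by
  intro j hj he
  exact Nat.find_min (pvMuEx g) hj ⟨hj.trans (pvMu_lt g), he⟩

-- K2: one period forward is the identity from pvMu on
theorem pvK2 (g : List (List Char)) (k : Nat) (hk : pvMu g ≤ k) :
    pvCycle^[k + pvLam g] g = pvCycle^[k] g := by
  have h1 : k + pvLam g = (k - pvMu g) + (pvMu g + pvLam g) := by omega
  have h2 : k = (k - pvMu g) + pvMu g := by omega
  rw [h1, pvMuLam, Function.iterate_add_apply, pvIt_I, ← Function.iterate_add_apply, ← h2]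

theorem pvK2' (g : List (List Char)) (t k : Nat) (hk : pvMu g ≤ k) :
    pvCycle^[k + t * pvLam g] g = pvCycle^[k] g := by
  induction t with
  | zero => simp
  | succ n ih =>
    have : k + (n + 1) * pvLam g = (k + n * pvLam g) + pvLam g := by ring
    rw [this, pvK2 g _ (by omega), ih]

-- K3: congruent indices past pvMu give equal grids
theorem pvK3 (g : List (List Char)) (a b : Nat) (ha : pvMu g ≤ a) (hab : a ≤ b)
    (hd : pvLam g ∣ b - a) : pvCycle^[a] g = pvCycle^[b] g := by
  obtain ⟨t, ht⟩ := hd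
  have hc : pvLam g * t = t * pvLam g := Nat.mul_comm _ _
  have : b = a + t * pvLam g := by omega
  rw [this, pvK2' g t a ha]

-- normal form: any index past pvMu reduces into [pvMu, pvI)
theorem pvNorm (g : List (List Char)) (a : Nat) (ha : pvMu g ≤ a) :
    pvCycle^[a] g = pvCycle^[pvMu g + (a - pvMu g) % pvLam g] g := by
  have hq := Nat.div_add_mod (a - pvMu g) (pvLam g)
  refine (pvK3 g (pvMu g + (a - pvMu g) % pvLam g) a (by omega) (by
    have := Nat.mod_le (a - pvMu g) (pvLam g)
    omega) ⟨(a - pvMu g) / pvLam g, by omega⟩).symm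

theorem pvNorm_lt (g : List (List Char)) (a : Nat) :
    pvMu g + (a - pvMu g) % pvLam g < pvI g := by
  have h1 := Nat.mod_lt (a - pvMu g) (pvLam_pos g)
  have := pvMuLam g
  omega

-- K4: any collision pins down pvMu and pvLam
theorem pvK4 (g : List (List Char)) (a b : Nat) (hab : a < b)
    (he : pvCycle^[a] g = pvCycle^[b] g) : pvMu g ≤ a ∧ pvLam g ∣ (b - a) := by
  have hmua : pvMu g ≤ a := by
    by_contra hlt
    push Not at hlt
    rcases Nat.lt_or_ge b (pvI g) with hb | hb
    · exact pvK1 g a b hab hb he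
    · have hmub : pvMu g ≤ b := le_of_lt ((pvMu_lt g).trans_le hb)
      have hn := pvNorm g b hmub
      have hc := pvNorm_lt g b
      have hac : a < pvMu g + (b - pvMu g) % pvLam g := by omega
      exact pvK1 g a _ hac hc (he.trans hn)
  refine ⟨hmua, ?_⟩
  have hmub : pvMu g ≤ b := by omega
  have hna := pvNorm g a hmua
  have hnb := pvNorm g b hmub
  have hca := pvNorm_lt g a
  have hcb := pvNorm_lt g b
  have heq : pvCycle^[pvMu g + (a - pvMu g) % pvLam g] g
      = pvCycle^[pvMu g + (b - pvMu g) % pvLam g] g := by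
    rw [← hna, ← hnb, he]
  have hid : (a - pvMu g) % pvLam g = (b - pvMu g) % pvLam g := by
    by_contra hne
    rcases Nat.lt_or_ge ((a - pvMu g) % pvLam g) ((b - pvMu g) % pvLam g) with hlt | hge
    · exact pvK1 g _ _ (by omega) hcb heq
    · exact pvK1 g _ _ (by omega) hca heq.symm
  have hmodeq : (a - pvMu g) ≡ (b - pvMu g) [MOD pvLam g] := hid
  have hdvd := (Nat.modEq_iff_dvd' (by omega)).mp hmodeq
  have : b - pvMu g - (a - pvMu g) = b - a := by omega
  rwa [this] at hdvd

-- the collision happens within the pigeonhole bound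
theorem pvI_le (g : List (List Char)) :
    pvI g ≤ (1114113 ^ (pvC g + 1) + 1) ^ (pvC g + 1) := by
  have hnd : ((List.range (pvI g)).map (fun k => pvCycle^[k] g)).Nodup := by
    apply List.Nodup.map_on
    · intro x hx y hy hxy
      simp only [List.mem_range] at hx hy
      by_contra hne
      rcases Nat.lt_or_ge x y with hlt | hge
      · exact pvK1 g x y hlt hy hxy
      · exact pvK1 g y x (by omega) hx hxy.symm
    · exact List.nodup_range
  have hb : ∀ x ∈ (List.range (pvI g)).map (fun k => pvCycle^[k] g), pvBnd (pvC g) x := by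
    intro x hx
    obtain ⟨k, _, rfl⟩ := List.mem_map.mp hx
    exact pvIter_bnd g k
  have := pvPigeon (pvC g) _ hnd hb
  simpa using this

-- § 6: A's memoization loop and A's result in closed form

theorem pvLoopA_spec (g : List (List Char)) : ∀ (fuel i : Nat),
    pvI g ≤ i + fuel → i < pvI g →
    pvLoopA fuel (pvCycle^[i] g)
      (PySem.Set.ofList ((List.range (i + 1)).map (fun k => pvCycle^[k] g)))
      ((List.range (i + 1)).map (fun k => pvCycle^[k] g)) (i : Int)
    = (pvCycle^[pvI g] g, (List.range (pvI g)).map (fun k => pvCycle^[k] g), (pvI g : Int)) := by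
  intro fuel
  induction fuel with
  | zero => intro i h1 h2; omega
  | succ n ih =>
    intro i h1 h2
    rw [pvLoopA]
    have hg' : pvCycle (pvCycle^[i] g) = pvCycle^[i + 1] g :=
      (Function.iterate_succ_apply' pvCycle i g).symm
    simp only [hg']
    rcases Nat.lt_or_ge (i + 1) (pvI g) with hlt | hge
    · -- no collision yet: recurse
      have hmem : (PySem.Set.ofList ((List.range (i + 1)).map (fun k => pvCycle^[k] g))).contains
          (pvCycle^[i + 1] g) = false := by
        rw [Bool.eq_false_iff]
        intro hcon
        have := (PySem.Set.contains_iff _ _).mp hcon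
        rw [PySem.Set.mem_ofList] at this
        obtain ⟨j, hj, hje⟩ := List.mem_map.mp this
        rw [List.mem_range] at hj
        exact pvK1 g j (i + 1) (by omega) hlt hje
      rw [hmem]
      simp only [Bool.false_eq_true, if_false]
      have hseen : (List.range (i + 1)).map (fun k => pvCycle^[k] g) ++ [pvCycle^[i + 1] g]
          = (List.range (i + 2)).map (fun k => pvCycle^[k] g) := by
        conv_rhs => rw [show i + 2 = (i + 1) + 1 by rfl, List.range_succ]
        rw [List.map_append]
        rfl
      have hset : (PySem.Set.ofList ((List.range (i + 1)).map (fun k => pvCycle^[k] g))).add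
          (pvCycle^[i + 1] g)
          = PySem.Set.ofList ((List.range (i + 2)).map (fun k => pvCycle^[k] g)) := by
        rw [← PySem.Set.ofList_append_singleton, hseen]
      rw [hset, hseen]
      have := ih (i + 1) (by omega) hlt
      push_cast at this
      exact this
    · -- i + 1 = pvI g : the loop breaks
      have hI : i + 1 = pvI g := by omega
      have hmem : (PySem.Set.ofList ((List.range (i + 1)).map (fun k => pvCycle^[k] g))).contains
          (pvCycle^[i + 1] g) = true := by
        rw [PySem.Set.contains_iff, PySem.Set.mem_ofList]
        refine List.mem_map.mpr ⟨pvMu g, ?_, ?_⟩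
        · rw [List.mem_range]
          have := pvMu_lt g
          omega
        · rw [hI, pvIt_I]
      rw [hmem]
      simp only [if_true]
      rw [hI]
      have hc : ((i : Int) + 1) = ((pvI g : Nat) : Int) := by omega
      rw [hc]

-- the common final index
def pvIdxI (g : List (List Char)) : Int :=
  PySem.Int.mod (1000000000 - (pvMu g : Int)) ((pvLam g : Int)) + (pvMu g : Int)

def pvIdxN (g : List (List Char)) : Nat := (pvIdxI g).toNat

theorem pvIdxI_nonneg (g : List (List Char)) : 0 ≤ pvIdxI g := by
  have h1 := PySem.Int.mod_nonneg (1000000000 - (pvMu g : Int)) (b := (pvLam g : Int))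
    (by exact_mod_cast pvLam_pos g)
  unfold pvIdxI
  positivity

theorem pvIdxI_eq (g : List (List Char)) : pvIdxI g = (pvIdxN g : Int) := by
  rw [pvIdxN, Int.toNat_of_nonneg (pvIdxI_nonneg g)]

theorem pvIdxN_lt (g : List (List Char)) : pvIdxN g < pvI g := by
  have h1 := PySem.Int.mod_nonneg (1000000000 - (pvMu g : Int)) (b := (pvLam g : Int))
    (by exact_mod_cast pvLam_pos g)
  have h2 := PySem.Int.mod_lt (1000000000 - (pvMu g : Int)) (b := (pvLam g : Int))
    (by exact_mod_cast pvLam_pos g)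
  have h3 := pvMuLam g
  have : pvIdxI g < (pvI g : Int) := by
    unfold pvIdxI
    have : ((pvMu g : Int)) + (pvLam g : Int) = (pvI g : Int) := by exact_mod_cast congrArg (Nat.cast : Nat → Int) h3
    omega
  unfold pvIdxN
  omega

-- A's result in closed form
theorem pvA_eq (lines : List String) :
    calculate_result_part_2 lines
      = pvLoad (pvCycle^[pvIdxN (lines.map (fun l => PySem.Chars.strip l.toList))]
          (lines.map (fun l => PySem.Chars.strip l.toList))) := by
  unfold calculate_result_part_2
  simp only []
  set g := lines.map (fun l => PySem.Chars.strip l.toList) with hg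
  have hstart := pvLoopA_spec g (pvF g) 0 (by
    have := pvI_le g
    unfold pvF
    omega) (pvI_pos g)
  simp only [Function.iterate_zero, id] at hstart
  have hrw : (List.range (0 + 1)).map (fun k => pvCycle^[k] g) = [g] := by
    simp
  rw [hrw] at hstart
  simp only [Nat.cast_zero] at hstart
  rw [hstart]
  -- offset = pvMu g
  have hidx : PySem.List.index? ((List.range (pvI g)).map (fun k => pvCycle^[k] g))
      (pvCycle^[pvI g] g) = some (pvMu g) := by
    rw [PySem.List.index?_eq_some_iff]
    refine ⟨(List.range (pvMu g)).map (fun k => pvCycle^[k] g),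
      ((List.range (pvLam g - 1)).map (fun k => pvCycle^[pvMu g + 1 + k] g)), ?_, by simp, ?_⟩
    · rw [pvIt_I]
      have hI : pvI g = pvMu g + ((pvLam g - 1) + 1) := by
        have := pvMuLam g
        have := pvLam_pos g
        omega
      conv_lhs => rw [hI, List.range_add, List.map_append, List.range_succ_eq_map]
      simp only [List.map_cons, List.map_map, Nat.add_zero]
      congr 1
      · congr 1
        apply List.map_congr_left
        intro k _
        simp only [Function.comp_def]
        congr 1
        omega
    · intro hmem
      obtain ⟨j, hj, hje⟩ := List.mem_map.mp hmem
      rw [List.mem_range] at hj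
      exact pvMu_min g j hj hje.symm
  rw [hidx]
  simp only [Option.getD_some]
  have hoffs : ((pvMu g : Nat) : Int) = (pvMu g : Int) := rfl
  have hlam : (pvI g : Int) - (pvMu g : Int) = (pvLam g : Int) := by
    have := pvMuLam g
    push_cast [← this]
    ring
  rw [hlam]
  have hpyget : PySem.List.pyGet? ((List.range (pvI g)).map (fun k => pvCycle^[k] g)) (pvIdxI g)
      = some (pvCycle^[pvIdxN g] g) := by
    rw [pvIdxI_eq, PySem.List.pyGet?_natCast]
    rw [List.getElem?_map]
    rw [List.getElem?_range (pvIdxN_lt g)]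
    rfl
  rw [show PySem.Int.mod (1000000000 - (pvMu g:Nat).cast) ((pvLam g : Int)) + ((pvMu g : Nat) : Int) = pvIdxI g from rfl]
  rw [hpyget]
  rfl

-- § 7: the run-length sort equals the descending library sort

-- sum of a one-hot map over a duplicate-free list
theorem pvSumOneHot (x : Char) (f : Char → Nat) : ∀ (K : List Char), K.Nodup →
    (K.map (fun c => if c = x then f c else 0)).sum = if x ∈ K then f x else 0 := by
  intro K
  induction K with
  | nil => simp
  | cons c t ih =>
    intro hnd
    rw [List.map_cons, List.sum_cons, ih (List.Nodup.of_cons hnd)]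
    by_cases hc : c = x
    · subst hc
      have hx : c ∉ t := (List.nodup_cons.mp hnd).1
      rw [if_pos rfl, if_neg hx, if_pos (by simp)]
      simp
    · rw [if_neg hc]
      by_cases hxt : x ∈ t
      · rw [if_pos hxt, if_pos (by simp [hxt])]
        simp
      · rw [if_neg hxt, if_neg (by
          intro hmem
          rcases List.mem_cons.mp hmem with h | h
          · exact hc h.symm
          · exact hxt h)]

theorem pvBSort_eq (cs : List Char) : pvBSort cs = pvSortedDesc cs := by
  unfold pvBSort
  simp only []
  set counts := cs.foldl (fun d c => d.insert c (d.getD c 0 + 1))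
    (PySem.Dict.empty (κ := Char) (ν := Nat)) with hcounts
  have hkeys : counts.keys = PySem.Set.ofList cs := by
    rw [hcounts, PySem.Dict.keys_foldl_insert]
    rfl
  have hcnt : ∀ c, counts.getD c 0 = cs.count c := by
    intro c
    rw [hcounts]
    have h := PySem.Dict.getD_foldl_modify_add_one_nat cs
      (PySem.Dict.empty (κ := Char) (ν := Nat)) c
    have h2 : (PySem.Dict.empty (κ := Char) (ν := Nat)).getD c 0 = 0 := rfl
    rw [h2, Nat.zero_add] at h
    exact h
  set K := PySem.List.sorted counts.keys (fun c => c) true with hK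
  have hperm : K.Perm counts.keys := PySem.List.sorted_perm _ _ _
  have hnd : K.Nodup := hperm.nodup_iff.mpr (hkeys ▸ PySem.Set.nodup_ofList cs)
  have hle : K.Pairwise (fun a b => b ≤ a) := PySem.List.sorted_pairwise_rev _ _
  have hlt : K.Pairwise (fun a b => b < a) :=
    (hle.and hnd).imp (fun h => lt_of_le_of_ne h.1 (Ne.symm h.2))
  have hbij : ∀ x, x ∈ K ↔ x ∈ cs := by
    intro x
    rw [hK, PySem.List.mem_sorted, hkeys, PySem.Set.mem_ofList]
  -- the expansion is a permutation of cs
  have hperm2 : (K.flatMap (fun c => List.replicate (counts.getD c 0) c)).Perm cs := by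
    rw [List.perm_iff_count]
    intro x
    rw [List.count_flatMap]
    have hmap : K.map (List.count x ∘ fun c => List.replicate (counts.getD c 0) c)
        = K.map (fun c => if c = x then cs.count c else 0) := by
      apply List.map_congr_left
      intro c _
      simp only [Function.comp_apply, List.count_replicate, hcnt]
      by_cases hcx : c = x
      · rw [if_pos (by simp [hcx]), if_pos hcx]
      · rw [if_neg (by simpa using hcx), if_neg hcx]
    rw [hmap, pvSumOneHot x (fun c => cs.count c) K hnd]
    by_cases hx : x ∈ K
    · rw [if_pos hx]
    · rw [if_neg hx]
      symm
      rw [List.count_eq_zero]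
      exact fun hmem => hx ((hbij x).mpr hmem)
  -- the expansion is sorted descending
  have hsorted : (K.flatMap (fun c => List.replicate (counts.getD c 0) c)).Pairwise
      (fun a b : Char => b ≤ a) := by
    rw [List.pairwise_flatMap]
    refine ⟨fun c _ => ?_, ?_⟩
    · rw [List.pairwise_replicate]
      exact Or.inr le_rfl
    · apply hlt.imp
      intro a b hab x hx y hy
      rw [List.eq_of_mem_replicate hx, List.eq_of_mem_replicate hy]
      exact le_of_lt hab
  -- the descending library sort is the unique descending permutation
  have hs1 : (pvSortedDesc cs).Pairwise (fun a b : Char => b ≤ a) :=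
    PySem.List.sorted_pairwise_rev cs (fun c => c)
  have hs2 : (pvSortedDesc cs).Perm cs := PySem.List.sorted_perm cs (fun c => c) true
  exact List.Perm.eq_of_pairwise
    (fun a b _ _ h1 h2 => le_antisymm h2 h1) hsorted hs1 (hperm2.trans hs2.symm)

-- § 8: B's tilt row, transposition and quarter turn equal A's

theorem pvBTiltRow_eq (row : List Char) : pvBTiltRow row = pvRollRow row := by
  unfold pvBTiltRow pvRollRow
  congr 1
  exact List.map_congr_left (fun part _ => pvBSort_eq part)

theorem pvBWidth_zero (g : List (List Char)) (r : List Char) (hr : r ∈ g) (hre : r = []) :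
    pvBWidth g = 0 := by
  unfold pvBWidth
  rcases h : (g.map List.length).min? with _ | m
  · simp
  · have hm := List.min?_eq_some_iff.mp h
    have h0 : 0 ∈ g.map List.length := List.mem_map.mpr ⟨r, hr, by simp [hre]⟩
    have := hm.2 0 h0
    simp
    omega

theorem pvBWidth_pos (g : List (List Char)) (hne : g ≠ []) (h : ∀ r ∈ g, r ≠ []) :
    1 ≤ pvBWidth g := by
  unfold pvBWidth
  rcases hm : (g.map List.length).min? with _ | m
  · rw [List.min?_eq_none_iff] at hm
    exact absurd (List.map_eq_nil_iff.mp hm) hne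
  · have hspec := List.min?_eq_some_iff.mp hm
    obtain ⟨r, hr, hlen⟩ := List.mem_map.mp hspec.1
    have : r ≠ [] := h r hr
    have : 1 ≤ r.length := List.length_pos_of_ne_nil this
    simp
    omega

theorem pvBWidth_tail (g : List (List Char)) (hne : g ≠ []) (h : ∀ r ∈ g, r ≠ []) :
    pvBWidth (g.map (fun r => r.tail)) = pvBWidth g - 1 := by
  have hmap : (g.map (fun r => r.tail)).map List.length = (g.map List.length).map (fun n => n - 1) := by
    rw [List.map_map, List.map_map]
    apply List.map_congr_left
    intro r _
    simp [List.length_tail]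
  unfold pvBWidth
  rw [hmap]
  rcases hm : (g.map List.length).min? with _ | m
  · rw [List.min?_eq_none_iff] at hm
    exact absurd (List.map_eq_nil_iff.mp hm) hne
  · have hspec := List.min?_eq_some_iff.mp hm
    have hm' : ((g.map List.length).map (fun n => n - 1)).min? = some (m - 1) := by
      rw [List.min?_eq_some_iff]
      constructor
      · exact List.mem_map.mpr ⟨m, hspec.1, rfl⟩
      · intro b hb
        obtain ⟨a, ha, rfl⟩ := List.mem_map.mp hb
        have := hspec.2 a ha
        omega
    rw [hm']
    simp

-- the index-based transposition is A's recursive zip(*grid)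
theorem pvBTrans_eq (g : List (List Char)) :
    (List.range (pvBWidth g)).map (fun i => g.map (fun r => r.getD i ' ')) = pvZipStar g := by
  fun_induction pvZipStar g with
  | case1 =>
    have : pvBWidth [] = 0 := by unfold pvBWidth; simp
    rw [this]
    simp
  | case2 r g h =>
    simp only [List.any_eq_true] at h
    obtain ⟨x, hx, hxe⟩ := h
    rw [pvBWidth_zero (r :: g) x hx (by simpa using hxe)]
    simp
  | case3 r g h ih =>
    have hrows : ∀ x ∈ r :: g, x ≠ [] := by
      simp only [List.any_eq_true] at h
      intro x hx hxe
      exact h ⟨x, hx, by simp [hxe]⟩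
    have h1 := pvBWidth_pos (r :: g) (by simp) hrows
    have ht := pvBWidth_tail (r :: g) (by simp) hrows
    obtain ⟨w, hw⟩ : ∃ w, pvBWidth (r :: g) = w + 1 := ⟨pvBWidth (r :: g) - 1, by omega⟩
    rw [hw, List.range_succ_eq_map, List.map_cons, List.map_map]
    congr 1
    · -- column 0 is the heads
      apply List.map_congr_left
      intro x hx
      have : x ≠ [] := hrows x hx
      cases x with
      | nil => exact absurd rfl this
      | cons a t => simp [List.headI]
    · -- columns i+1 of g are columns i of the tails
      rw [← ih]
      rw [ht, hw]
      simp only [Nat.add_sub_cancel]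
      apply List.map_congr_left
      intro i _
      simp only [Function.comp_def, Nat.succ_eq_add_one, List.map_map]
      apply List.map_congr_left
      intro x _
      cases x with
      | nil => simp
      | cons a t => simp

theorem pvBQuarter_eq (g : List (List Char)) : pvBQuarter g = pvQuarter g := by
  unfold pvBQuarter
  simp only []
  rw [pvBTrans_eq]
  unfold pvQuarter
  rw [pvRoll_eq_map, List.map_map]
  apply List.map_congr_left
  intro z _
  simp only [Function.comp_def]
  rw [pvBTiltRow_eq]

-- § 9: B's spin is A's cycle

theorem pvBSpin_eq (g : List (List Char)) : pvBSpin g = pvCycle g := by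
  unfold pvBSpin
  rw [pvCycle_eq, pvBQuarter_eq, pvBQuarter_eq, pvBQuarter_eq, pvBQuarter_eq]

-- applying B's spin to an iterate of A's cycle steps the iterate
theorem pvBStep (g : List (List Char)) (k : Nat) :
    pvBSpin (pvCycle^[k] g) = pvCycle^[k + 1] g := by
  rw [pvBSpin_eq]
  exact (Function.iterate_succ_apply' pvCycle k g).symm

theorem pvBIter (g : List (List Char)) : ∀ n,
    (List.range n).foldl (fun h _ => pvBSpin h) g = pvCycle^[n] g := by
  intro n
  induction n with
  | zero => simp
  | succ m ih =>
    rw [List.range_succ, List.foldl_append, ih]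
    simp only [List.foldl_cons, List.foldl_nil]
    exact pvBStep g m

-- § 10: both load computations equal the same suffix-weighted sum

def pvS : List (List Char) → Int
  | [] => 0
  | r :: t => (PySem.Chars.count r ['O'] : Int) * ((t.length : Int) + 1) + pvS t

theorem pvLoadA_aux (n : Int) : ∀ (g : List (List Char)) (s a : Int),
    n - s = (g.length : Int) →
    (PySem.List.enumerate g s).foldl
      (fun result p => result + (PySem.Chars.count p.2 ['O'] : Int) * (n - p.1)) a
    = a + pvS g := by
  intro g
  induction g with
  | nil => intro s a _; simp [pvS]
  | cons r t ih =>
    intro s a hn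
    rw [PySem.List.enumerate_cons, List.foldl_cons]
    rw [ih (s + 1) _ (by push_cast [List.length_cons] at hn ⊢; omega)]
    have hw : n - s = (t.length : Int) + 1 := by push_cast [List.length_cons] at hn ⊢; omega
    rw [hw]
    simp only [pvS]
    ring

theorem pvLoad_eq_S (g : List (List Char)) : pvLoad g = pvS g := by
  unfold pvLoad
  rw [pvLoadA_aux (g.length : Int) g 0 0 (by simp)]
  simp

theorem pvBLoad_aux : ∀ (g : List (List Char)) (a : Int),
    (PySem.List.enumerate g.reverse 1).foldl
      (fun total p => total + (PySem.Chars.count p.2 ['O'] : Int) * p.1) a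
    = a + pvS g := by
  intro g
  induction g with
  | nil => intro a; simp [pvS]
  | cons r t ih =>
    intro a
    rw [List.reverse_cons, PySem.List.enumerate_append, List.foldl_append, ih a]
    simp only [PySem.List.enumerate_cons, PySem.List.enumerate_nil, List.foldl_cons,
      List.foldl_nil, List.length_reverse, pvS]
    push_cast
    ring

theorem pvBLoad_eq_S (g : List (List Char)) : pvBLoad g = pvS g := by
  unfold pvBLoad
  rw [pvBLoad_aux g 0]
  simp

-- § 11: Floyd's phases find exactly 2*pvKd, pvMu and pvLam

theorem pvP1Ex (g : List (List Char)) : ∃ k, 0 < k ∧ pvCycle^[k] g = pvCycle^[2 * k] g := by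
  refine ⟨pvLam g * (pvMu g / pvLam g + 1), ?_, ?_⟩
  · have := pvLam_pos g
    positivity
  · set k0 := pvLam g * (pvMu g / pvLam g + 1) with hk0
    have hl := pvLam_pos g
    have hmu : pvMu g ≤ k0 := by
      have h1 := Nat.div_add_mod (pvMu g) (pvLam g)
      have h2 := Nat.mod_lt (pvMu g) hl
      have h3 : pvLam g * (pvMu g / pvLam g + 1) = pvLam g * (pvMu g / pvLam g) + pvLam g := by ring
      omega
    refine pvK3 g k0 (2 * k0) hmu (by omega) ?_
    have h5 : 2 * k0 - k0 = k0 := by omega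
    rw [h5, hk0]
    exact dvd_mul_right _ _

def pvKd (g : List (List Char)) : Nat := Nat.find (pvP1Ex g)

theorem pvKd_pos (g : List (List Char)) : 0 < pvKd g := (Nat.find_spec (pvP1Ex g)).1
theorem pvKd_eq (g : List (List Char)) : pvCycle^[pvKd g] g = pvCycle^[2 * pvKd g] g :=
  (Nat.find_spec (pvP1Ex g)).2

theorem pvKd_le (g : List (List Char)) : pvKd g ≤ pvI g := by
  have h := Nat.find_min' (pvP1Ex g) (m := pvLam g * (pvMu g / pvLam g + 1)) (by
    have hl := pvLam_pos g
    refine ⟨by positivity, ?_⟩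
    have hmu : pvMu g ≤ pvLam g * (pvMu g / pvLam g + 1) := by
      have h1 := Nat.div_add_mod (pvMu g) (pvLam g)
      have h2 := Nat.mod_lt (pvMu g) hl
      have h3 : pvLam g * (pvMu g / pvLam g + 1) = pvLam g * (pvMu g / pvLam g) + pvLam g := by
        ring
      omega
    refine pvK3 g _ _ hmu (by omega) ?_
    have h5 : 2 * (pvLam g * (pvMu g / pvLam g + 1)) - pvLam g * (pvMu g / pvLam g + 1)
        = pvLam g * (pvMu g / pvLam g + 1) := by omega
    rw [h5]
    exact dvd_mul_right _ _)
  refine h.trans ?_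
  have h1 := Nat.div_add_mod (pvMu g) (pvLam g)
  have h2 := Nat.mod_lt (pvMu g) (pvLam_pos g)
  have h3 : pvLam g * (pvMu g / pvLam g + 1) = pvLam g * (pvMu g / pvLam g) + pvLam g := by ring
  have h4 := pvMuLam g
  omega

theorem pvKd_dvd (g : List (List Char)) : pvLam g ∣ pvKd g := by
  have := (pvK4 g (pvKd g) (2 * pvKd g) (by have := pvKd_pos g; omega) (pvKd_eq g)).2
  have h2 : 2 * pvKd g - pvKd g = pvKd g := by omega
  rwa [h2] at this

theorem pvBPhase1_spec (g : List (List Char)) : ∀ (fuel k : Nat),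
    1 ≤ k → k ≤ pvKd g → pvKd g ≤ k + fuel →
    pvBPhase1 fuel (pvCycle^[k] g) (pvCycle^[2 * k] g) = pvCycle^[2 * pvKd g] g := by
  intro fuel
  induction fuel with
  | zero =>
    intro k h1 h2 h3
    have : k = pvKd g := by omega
    subst this
    rfl
  | succ n ih =>
    intro k h1 h2 h3
    rw [pvBPhase1]
    by_cases he : pvCycle^[k] g = pvCycle^[2 * k] g
    · have hk : pvKd g ≤ k := Nat.find_min' (pvP1Ex g) ⟨by omega, he⟩
      have : k = pvKd g := by omega
      subst this
      rw [if_pos he]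
    · rw [if_neg he]
      have ht : pvBSpin (pvCycle^[k] g) = pvCycle^[k + 1] g := pvBStep g k
      have hh : pvBSpin (pvBSpin (pvCycle^[2 * k] g)) = pvCycle^[2 * (k + 1)] g := by
        rw [pvBStep g (2 * k), pvBStep g (2 * k + 1)]
        congr 1
      rw [ht, hh]
      have hk : k ≠ pvKd g := by
        intro hkk
        rw [hkk] at he
        exact he (pvKd_eq g)
      exact ih (k + 1) (by omega) (by omega) (by omega)

theorem pvP2_iff (g : List (List Char)) (m : Nat) :
    pvCycle^[m] g = pvCycle^[m + 2 * pvKd g] g ↔ pvMu g ≤ m := by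
  constructor
  · intro he
    exact (pvK4 g m (m + 2 * pvKd g) (by have := pvKd_pos g; omega) he).1
  · intro hm
    refine pvK3 g m (m + 2 * pvKd g) hm (by omega) ?_
    have h2 : m + 2 * pvKd g - m = 2 * pvKd g := by omega
    rw [h2]
    exact Dvd.dvd.mul_left (pvKd_dvd g) 2

theorem pvBPhase2_spec (g : List (List Char)) : ∀ (fuel m : Nat),
    m ≤ pvMu g → pvMu g ≤ m + fuel →
    pvBPhase2 fuel (pvCycle^[m] g) (pvCycle^[m + 2 * pvKd g] g) m
      = (pvCycle^[pvMu g] g, pvMu g) := by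
  intro fuel
  induction fuel with
  | zero =>
    intro m h1 h2
    have : m = pvMu g := by omega
    subst this
    rfl
  | succ n ih =>
    intro m h1 h2
    rw [pvBPhase2]
    by_cases he : pvCycle^[m] g = pvCycle^[m + 2 * pvKd g] g
    · have hm : m = pvMu g := by
        have := (pvP2_iff g m).mp he
        omega
      subst hm
      rw [if_pos he]
    · rw [if_neg he]
      have hm : m < pvMu g := by
        rcases Nat.lt_or_ge m (pvMu g) with h | h
        · exact h
        · exact absurd ((pvP2_iff g m).mpr h) he
      have ht : pvBSpin (pvCycle^[m] g) = pvCycle^[m + 1] g := pvBStep g m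
      have hh : pvBSpin (pvCycle^[m + 2 * pvKd g] g) = pvCycle^[(m + 1) + 2 * pvKd g] g := by
        rw [pvBStep g (m + 2 * pvKd g)]
        congr 1
        ring
      rw [ht, hh]
      exact ih (m + 1) (by omega) (by omega)

theorem pvP3_iff (g : List (List Char)) (j : Nat) (h1 : 1 ≤ j) (h2 : j ≤ pvLam g) :
    pvCycle^[pvMu g] g = pvCycle^[pvMu g + j] g ↔ j = pvLam g := by
  constructor
  · intro he
    have := (pvK4 g (pvMu g) (pvMu g + j) (by omega) he).2
    have h3 : pvMu g + j - pvMu g = j := by omega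
    rw [h3] at this
    have := Nat.le_of_dvd (by omega) this
    omega
  · intro hj
    subst hj
    exact (pvK2 g (pvMu g) le_rfl).symm

theorem pvBPhase3_spec (g : List (List Char)) : ∀ (fuel j : Nat),
    1 ≤ j → j ≤ pvLam g → pvLam g ≤ j + fuel →
    pvBPhase3 fuel (pvCycle^[pvMu g] g) (pvCycle^[pvMu g + j] g) j = pvLam g := by
  intro fuel
  induction fuel with
  | zero =>
    intro j h1 h2 h3
    have : j = pvLam g := by omega
    subst this
    rfl
  | succ n ih =>
    intro j h1 h2 h3
    rw [pvBPhase3]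
    by_cases he : pvCycle^[pvMu g] g = pvCycle^[pvMu g + j] g
    · have := (pvP3_iff g j h1 h2).mp he
      subst this
      rw [if_pos he]
    · rw [if_neg he]
      have hj : j < pvLam g := by
        rcases Nat.lt_or_ge j (pvLam g) with h | h
        · exact h
        · have : j = pvLam g := by omega
          exact absurd ((pvP3_iff g j h1 h2).mpr this) he
      have hh : pvBSpin (pvCycle^[pvMu g + j] g) = pvCycle^[pvMu g + (j + 1)] g := by
        rw [pvBStep g (pvMu g + j)]
        congr 1
      rw [hh]
      exact ih (j + 1) (by omega) (by omega) (by omega)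

-- § 12: B's result in closed form: the same index, the same load

theorem pvB_eq (lines : List String) :
    calculate_result_part_2_alt lines
      = pvLoad (pvCycle^[pvIdxN (lines.map (fun l => PySem.Chars.strip l.toList))]
          (lines.map (fun l => PySem.Chars.strip l.toList))) := by
  unfold calculate_result_part_2_alt
  simp only []
  set g := lines.map (fun l => PySem.Chars.strip l.toList) with hg
  have hfuel : pvI g ≤ pvF g := by
    have := pvI_le g
    unfold pvF
    omega
  have h1 : pvBPhase1 (pvF g) (pvBSpin g) (pvBSpin (pvBSpin g)) = pvCycle^[2 * pvKd g] g := by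
    have hs := pvBPhase1_spec g (pvF g) 1 le_rfl (pvKd_pos g) (by
      have := pvKd_le g
      omega)
    have e1 : pvCycle^[1] g = pvBSpin g := by
      rw [pvBSpin_eq g]; simp
    have e2 : pvCycle^[2 * 1] g = pvBSpin (pvBSpin g) := by
      rw [show (2 * 1 : Nat) = 0 + 1 + 1 by rfl]
      rw [← pvBStep g (0 + 1), ← pvBStep g 0]
      simp
    rw [e1, e2] at hs
    exact hs
  rw [h1]
  have h2 : pvBPhase2 (pvF g) g (pvCycle^[2 * pvKd g] g) 0 = (pvCycle^[pvMu g] g, pvMu g) := by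
    have hs := pvBPhase2_spec g (pvF g) 0 (Nat.zero_le _) (by
      have := pvMu_lt g
      omega)
    have e1 : pvCycle^[0] g = g := by simp
    have e2 : (0 : Nat) + 2 * pvKd g = 2 * pvKd g := by omega
    rw [e1, e2] at hs
    exact hs
  rw [h2]
  simp only []
  have h3 : pvBPhase3 (pvF g) (pvCycle^[pvMu g] g) (pvBSpin (pvCycle^[pvMu g] g)) 1 = pvLam g := by
    have hs := pvBPhase3_spec g (pvF g) 1 le_rfl (pvLam_pos g) (by
      have h4 := pvMuLam g
      omega)
    have e1 : pvCycle^[pvMu g + 1] g = pvBSpin (pvCycle^[pvMu g] g) := (pvBStep g (pvMu g)).symm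
    rw [e1] at hs
    exact hs
  rw [h3]
  rw [pvBIter g]
  rw [pvBLoad_eq_S, ← pvLoad_eq_S]
  rfl

-- ===== VERDICT (by name: the statement is the Claim_ definition above) =====
theorem calculate_result_part_2_spec : Claim_equal_calculate_result_part_2 := by
  intro lines _
  unfold Spec_calculate_result_part_2
  rw [pvA_eq, pvB_eq]
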